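-- pv_equiv track=rewrite | github.com/MrBrantCode/unitest_baseline | mut_generate/mist_train_cf/cf_7076/solution.py | reverse_string
-- ===== SOURCE A (Python) =====
-- def reverse_string(s):
--     # Convert the string to a list of characters
--     # so that we can modify it in-place
--     chars = list(s)
--
--     # Initialize the pointers
--     start = 0
--     end = len(chars) - 1
--
--     # Loop until the pointers meet in the middle
--     while start < end:
--         # If the start pointer is at a whitespace character,
--         # move it to the next non-whitespace character
--         if chars[start].isspace():
--             while start < end and chars[start].isspace():
--                 start += 1
--
--         # If the end pointer is at a whitespace character,
--         # move it to the next non-whitespace character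
--         if chars[end].isspace():
--             while start < end and chars[end].isspace():
--                 end -= 1
--
--         # Swap the characters at the start and end pointers
--         chars[start], chars[end] = chars[end], chars[start]
--
--         # Move the pointers towards each other
--         start += 1
--         end -= 1
--
--     # Convert the list of characters back to a string
--     return ''.join(chars)
-- ===== SOURCE B (Python) =====
-- def reverse_string(s):
--     rev = [c for c in s if not c.isspace()][::-1]
--     it = iter(rev)
--     return ''.join(c if c.isspace() else next(it) for c in s)
-- ===== Notes on version B (the rewrite author's own statement) =====
-- stated objective: simpler
-- what changed: Replaced the in-place outside-in two-pointer swap loop (with nested whitespace-skipping inner loops) by a two-pass gather-reverse-scatter: collect the non-whitespace characters, reverse them, and re-emit them into the non-whitespace positions in one forward pass.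
import Mathlib
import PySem

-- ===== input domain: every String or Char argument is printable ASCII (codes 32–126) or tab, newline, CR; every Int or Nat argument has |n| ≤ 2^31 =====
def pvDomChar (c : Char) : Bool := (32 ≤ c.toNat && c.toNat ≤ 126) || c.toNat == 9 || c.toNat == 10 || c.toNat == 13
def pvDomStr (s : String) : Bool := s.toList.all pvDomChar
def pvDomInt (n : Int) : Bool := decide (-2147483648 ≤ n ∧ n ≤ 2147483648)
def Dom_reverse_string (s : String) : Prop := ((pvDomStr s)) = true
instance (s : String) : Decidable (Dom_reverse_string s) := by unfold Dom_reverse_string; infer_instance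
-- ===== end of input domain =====

-- B replaces A's in-place two-pointer swapping with a gather–reverse–scatter two-pass rewrite (simpler).

-- ===== PORT A =====
-- chars[i] for A: every access below happens with 0 ≤ i < chars.length, so getD is exact there
def pyAt (l : List Char) (i : Int) : Char := l.getD i.toNat ' '

-- inner loop: while start < end and chars[start].isspace(): start += 1
def skipStart (l : List Char) (s e : Int) : Int :=
  if _h : s < e ∧ PySem.Chars.isspace (pyAt l s) then skipStart l (s + 1) e else s
termination_by (e - s).toNat
decreasing_by omega

-- inner loop: while start < end and chars[end].isspace(): end -= 1
def skipEnd (l : List Char) (s e : Int) : Int :=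
  if _h : s < e ∧ PySem.Chars.isspace (pyAt l e) then skipEnd l s (e - 1) else e
termination_by (e - s).toNat
decreasing_by omega

-- the first if-block of the loop body (advance start if it sits on whitespace)
def stepS (l : List Char) (s e : Int) : Int :=
  if PySem.Chars.isspace (pyAt l s) then skipStart l s e else s

-- the second if-block (retreat end if it sits on whitespace; start already advanced)
def stepE (l : List Char) (s e : Int) : Int :=
  if PySem.Chars.isspace (pyAt l e) then skipEnd l (stepS l s e) e else e

-- bounds cited by twoPtr's decreasing_by
theorem skipStart_bounds (l : List Char) (s e : Int) (h : s ≤ e) :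
    s ≤ skipStart l s e ∧ skipStart l s e ≤ e := by
  fun_induction skipStart l s e with
  | case1 s hc ih => have := ih (by omega); omega
  | case2 s hc => omega

theorem skipEnd_bounds (l : List Char) (s e : Int) (h : s ≤ e) :
    s ≤ skipEnd l s e ∧ skipEnd l s e ≤ e := by
  fun_induction skipEnd l s e with
  | case1 e hc ih => have := ih (by omega); omega
  | case2 e hc => omega

theorem stepS_bounds (l : List Char) (s e : Int) (h : s ≤ e) :
    s ≤ stepS l s e ∧ stepS l s e ≤ e := by
  unfold stepS; split
  · exact skipStart_bounds l s e h
  · omega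

theorem stepE_bounds (l : List Char) (s e : Int) (h : s ≤ e) :
    stepS l s e ≤ stepE l s e ∧ stepE l s e ≤ e := by
  unfold stepE; split
  · exact skipEnd_bounds l (stepS l s e) e (stepS_bounds l s e h).2
  · exact ⟨(stepS_bounds l s e h).2, le_refl e⟩

-- outer loop: while start < end: skip, skip, swap, start += 1, end -= 1
def twoPtr (l : List Char) (s e : Int) : List Char :=
  if h : s < e then
    twoPtr ((l.set (stepS l s e).toNat (pyAt l (stepE l s e))).set
              (stepE l s e).toNat (pyAt l (stepS l s e)))
      (stepS l s e + 1) (stepE l s e - 1)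
  else l
termination_by (e - s).toNat
decreasing_by
  have h1 := stepS_bounds l s e (le_of_lt h)
  have h2 := stepE_bounds l s e (le_of_lt h)
  omega

def reverse_string (s : String) : String :=
  let chars := s.toList
  String.ofList (twoPtr chars 0 ((chars.length : Int) - 1))

-- ===== PORT B =====
-- second pass of Source B: ''.join(c if c.isspace() else next(it) for c in s).
-- the [] branch is unreachable in B's run: rev holds exactly one char per non-space
-- slot of s, so next(it) never sees an exhausted iterator (which would raise).
def altScatter : List Char → List Char → List Char
  | [], _ => []
  | c :: cs, it =>
    if PySem.Chars.isspace c then c :: altScatter cs it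
    else
      match it with
      | r :: it' => r :: altScatter cs it'
      | [] => c :: altScatter cs []

def reverse_string_alt (s : String) : String :=
  let rev := (s.toList.filter (fun c => !PySem.Chars.isspace c)).reverse
  String.ofList (altScatter s.toList rev)

-- ===== PRECONDITION & SPEC =====
def Spec_reverse_string (s : String) (out : String) : Prop := out = reverse_string_alt s
instance (s : String) (out : String) : Decidable (Spec_reverse_string s out) := by unfold Spec_reverse_string; infer_instance

-- ===== CLAIM (what is proved, stated in full; the proofs are below) =====
def Claim_equal_reverse_string : Prop := ∀ (s : String), Dom_reverse_string s → Spec_reverse_string s (reverse_string s)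

-- ===== LEMMAS AND PROOFS =====

-- the segment l[i:j] (empty when j ≤ i)
def seg (l : List Char) (i j : Nat) : List Char := (l.drop i).take (j - i)

theorem seg_append (l : List Char) {i j k : Nat} (hij : i ≤ j) (hjk : j ≤ k) :
    seg l i k = seg l i j ++ seg l j k := by
  unfold seg
  rw [show k - i = (j - i) + (k - j) by omega, List.take_add, List.drop_drop,
    show i + (j - i) = j by omega]

theorem seg_singleton (l : List Char) {i : Nat} (h : i < l.length) :
    seg l i (i + 1) = [l[i]] := by
  unfold seg
  rw [show i + 1 - i = 1 by omega, List.take_one, List.head?_drop]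
  simp [List.getElem?_eq_getElem h]

theorem take_append_seg (l : List Char) {i j : Nat} (h : i ≤ j) :
    l.take i ++ seg l i j = l.take j := by
  unfold seg
  rw [show j = i + (j - i) by omega, List.take_add]
  congr 2
  omega

theorem seg_append_drop (l : List Char) {i j : Nat} (h : i ≤ j) :
    seg l i j ++ l.drop j = l.drop i := by
  unfold seg
  rw [show l.drop j = (l.drop i).drop (j - i) by rw [List.drop_drop]; congr 1; omega]
  exact List.take_append_drop _ _

theorem seg_set_outside (l : List Char) {k i j : Nat} (v : Char) (h : k < i ∨ j ≤ k) :
    seg (l.set k v) i j = seg l i j := by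
  unfold seg
  apply List.ext_getElem
  · simp
  · intro n h1 h2
    simp only [List.length_take, List.length_drop, List.length_set] at h1
    simp only [List.getElem_take, List.getElem_drop]
    rw [List.getElem_set_ne (by omega)]

theorem seg_all_space (l : List Char) {i j : Nat}
    (h : ∀ k : Nat, i ≤ k → k < j → k < l.length → PySem.Chars.isspace (l.getD k ' ') = true) :
    ∀ c ∈ seg l i j, PySem.Chars.isspace c = true := by
  intro c hc
  rw [List.mem_iff_getElem] at hc
  obtain ⟨n, hn, hval⟩ := hc
  have hrange : i + n < l.length ∧ i + n < j := by
    simp only [seg, List.length_take, List.length_drop] at hn; omega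
  rw [← hval]
  simp only [seg, List.getElem_take, List.getElem_drop]
  have := h (i + n) (by omega) hrange.2 hrange.1
  rwa [List.getD_eq_getElem l ' ' hrange.1] at this

-- scatter passes an all-space block through unchanged
theorem altScatter_space_prefix {a : List Char} (m it : List Char)
    (h : ∀ c ∈ a, PySem.Chars.isspace c = true) :
    altScatter (a ++ m) it = a ++ altScatter m it := by
  induction a with
  | nil => simp
  | cons c a ih =>
    have hc := h c (by simp)
    simp only [List.cons_append, altScatter, hc, if_pos]
    rw [ih (fun d hd => h d (by simp [hd]))]

theorem altScatter_all_space {a : List Char} (it : List Char)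
    (h : ∀ c ∈ a, PySem.Chars.isspace c = true) :
    altScatter a it = a := by
  have := altScatter_space_prefix (a := a) [] it h
  simpa [altScatter] using this

-- scatter splits when the first iterator piece has exactly one char per non-space slot
theorem altScatter_split {b : List Char} (m : List Char) {it : List Char} (t2 : List Char)
    (h : it.length = (b.filter (fun c => !PySem.Chars.isspace c)).length) :
    altScatter (b ++ m) (it ++ t2) = altScatter b it ++ altScatter m t2 := by
  induction b generalizing it with
  | nil =>
    have : it = [] := List.eq_nil_of_length_eq_zero (by simpa using h)
    subst this
    simp [altScatter]
  | cons c b ih =>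
    by_cases sp : PySem.Chars.isspace c
    · have hfb : (c :: b).filter (fun c => !PySem.Chars.isspace c) =
          b.filter (fun c => !PySem.Chars.isspace c) := by simp [sp]
      rw [hfb] at h
      simp only [List.cons_append, altScatter, sp, if_pos]
      rw [ih h]
    · have hfb : (c :: b).filter (fun c => !PySem.Chars.isspace c) =
          c :: b.filter (fun c => !PySem.Chars.isspace c) := by simp [sp]
      rw [hfb] at h
      cases it with
      | nil => simp at h
      | cons r it' =>
        simp [altScatter, sp]
        exact ih (by simp at h; omega)

-- scatter is the identity when at most one char is non-space
theorem altScatter_id {m : List Char}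
    (h : (m.filter (fun c => !PySem.Chars.isspace c)).length ≤ 1) :
    altScatter m ((m.filter (fun c => !PySem.Chars.isspace c)).reverse) = m := by
  induction m with
  | nil => simp [altScatter]
  | cons c m ih =>
    by_cases sp : PySem.Chars.isspace c
    · have hfb : (c :: m).filter (fun c => !PySem.Chars.isspace c) =
          m.filter (fun c => !PySem.Chars.isspace c) := by simp [sp]
      rw [hfb] at h ⊢
      simp only [altScatter, sp, if_pos]
      rw [ih h]
    · have hfb : (c :: m).filter (fun c => !PySem.Chars.isspace c) =
          c :: m.filter (fun c => !PySem.Chars.isspace c) := by simp [sp]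
      rw [hfb] at h ⊢
      have hm : m.filter (fun c => !PySem.Chars.isspace c) = [] := by
        cases hf : m.filter (fun c => !PySem.Chars.isspace c) with
        | nil => rfl
        | cons d t => rw [hf] at h; simp at h
      rw [hm]
      simp [altScatter, sp]
      exact altScatter_all_space [] (fun d hd => by
        by_contra hds
        have hmem : d ∈ m.filter (fun c => !PySem.Chars.isspace c) :=
          List.mem_filter.mpr ⟨hd, by simp [hds]⟩
        rw [hm] at hmem
        simp at hmem)

theorem skipStart_spec (l : List Char) (s e : Int) (h : s ≤ e) (h0 : 0 ≤ s) :
    (∀ k : Nat, s.toNat ≤ k → k < (skipStart l s e).toNat →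
        PySem.Chars.isspace (l.getD k ' ') = true) ∧
    (skipStart l s e = e ∨ PySem.Chars.isspace (pyAt l (skipStart l s e)) = false) := by
  fun_induction skipStart l s e with
  | case1 s hc ih =>
    have hb := skipStart_bounds l (s + 1) e (by omega)
    obtain ⟨ih1, ih2⟩ := ih (by omega) (by omega)
    refine ⟨?_, ih2⟩
    intro k hk1 hk2
    by_cases hk : k = s.toNat
    · subst hk
      simpa [pyAt] using hc.2
    · exact ih1 k (by omega) hk2
  | case2 s hc =>
    push Not at hc
    constructor
    · intro k hk1 hk2; omega
    · by_cases hse : s < e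
      · exact Or.inr (by simpa using hc hse)
      · exact Or.inl (by omega)

theorem skipEnd_spec (l : List Char) (s e : Int) (h : s ≤ e) (h0 : 0 ≤ s) :
    (∀ k : Nat, (skipEnd l s e).toNat < k → k ≤ e.toNat →
        PySem.Chars.isspace (l.getD k ' ') = true) ∧
    (skipEnd l s e = s ∨ PySem.Chars.isspace (pyAt l (skipEnd l s e)) = false) := by
  fun_induction skipEnd l s e with
  | case1 e hc ih =>
    have hb := skipEnd_bounds l s (e - 1) (by omega)
    obtain ⟨ih1, ih2⟩ := ih (by omega)
    refine ⟨?_, ih2⟩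
    intro k hk1 hk2
    by_cases hk : k = e.toNat
    · subst hk
      simpa [pyAt] using hc.2
    · exact ih1 k hk1 (by omega)
  | case2 e hc =>
    push Not at hc
    constructor
    · intro k hk1 hk2; omega
    · by_cases hse : s < e
      · exact Or.inr (by simpa using hc hse)
      · exact Or.inl (by omega)

theorem stepS_eq (l : List Char) (s e : Int) : stepS l s e = skipStart l s e := by
  unfold stepS; split
  · rfl
  · rename_i hsp
    rw [skipStart]
    simp [hsp]

theorem stepE_eq (l : List Char) (s e : Int) : stepE l s e = skipEnd l (stepS l s e) e := by
  unfold stepE; split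
  · rfl
  · rename_i hsp
    rw [skipEnd]
    simp [hsp]

-- take s ++ scatter (seg s t) rev ++ drop t = l when at most one char of l[s:t] is non-space
theorem assemble_small (l : List Char) {s t : Nat} (hst : s ≤ t) (_hlen : t ≤ l.length)
    (hf : ((seg l s t).filter (fun c => !PySem.Chars.isspace c)).length ≤ 1) :
    l.take s ++ altScatter (seg l s t)
        (((seg l s t).filter (fun c => !PySem.Chars.isspace c)).reverse) ++ l.drop t = l := by
  rw [altScatter_id hf, take_append_seg l hst, List.take_append_drop]

-- helpers for the swap step
theorem take_set_succ (l : List Char) {k : Nat} (v : Char) (h : k < l.length) :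
    (l.set k v).take (k + 1) = l.take k ++ [v] := by
  rw [List.take_add_one, List.take_set_of_le (le_refl k), List.getElem?_set_self (by omega)]
  rfl

theorem drop_set_cons (l : List Char) {k : Nat} (v : Char) (h : k < l.length) :
    (l.set k v).drop k = v :: l.drop (k + 1) := by
  rw [List.drop_eq_getElem_cons (by simpa using h), List.getElem_set_self,
    List.drop_set_of_lt (by omega)]

-- the main loop invariant: the two-pointer loop on l[s:t] is gather–reverse–scatter on l[s:t]
theorem twoPtr_eq (k : Nat) : ∀ (l : List Char) (s t : Nat), t - s ≤ k → s ≤ t → t ≤ l.length →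
    twoPtr l (s : Int) ((t : Int) - 1) =
      l.take s ++ altScatter (seg l s t) (((seg l s t).filter (fun c => !PySem.Chars.isspace c)).reverse) ++ l.drop t := by
  induction k with
  | zero =>
    intro l s t hk hst hlen
    have : s = t := by omega
    subst this
    rw [twoPtr, dif_neg (by omega)]
    exact (assemble_small l (le_refl s) hlen (by simp [seg])).symm
  | succ k ih =>
    intro l s t hk hst hlen
    by_cases hlt : (s : Int) < (t : Int) - 1
    · -- loop body runs once
      set e : Int := (t : Int) - 1 with he
      set s1 : Int := stepS l s e with hs1def
      set e1 : Int := stepE l s e with he1def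
      have hsb := stepS_bounds l s e (by omega)
      have heb := stepE_bounds l s e (by omega)
      have hs1skip : s1 = skipStart l s e := stepS_eq l s e
      have he1skip : e1 = skipEnd l s1 e := by rw [he1def, stepE_eq]
      have hspecS := skipStart_spec l s e (by omega) (by omega)
      rw [← hs1skip] at hspecS
      have hspecE := skipEnd_spec l s1 e (by omega) (by omega)
      rw [← he1skip] at hspecE
      set sn : Nat := s1.toNat with hsn
      set en : Nat := e1.toNat with hen
      have hsn1 : (s1 : Int) = (sn : Int) := by omega
      have hen1 : (e1 : Int) = (en : Int) := by omega
      have hbounds : s ≤ sn ∧ sn ≤ en ∧ en ≤ t - 1 ∧ t - 1 < l.length := by omega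
      have hsnlen : sn < l.length := by omega
      have henlen : en < l.length := by omega
      have hx : pyAt l s1 = l[sn] := List.getD_eq_getElem l ' ' hsnlen
      have hy : pyAt l e1 = l[en] := List.getD_eq_getElem l ' ' henlen
      rw [twoPtr, dif_pos hlt, ← hs1def, ← he1def, hx, hy]
      by_cases heqn : sn = en
      · -- pointers met on the same index: the swap is a no-op and the loop exits
        have h1 : l[en]'henlen = l[sn]'hsnlen := by congr 1; exact heqn.symm
        have hl' : (l.set sn l[en]).set en l[sn] = l := by
          rw [h1, List.set_getElem_self, ← h1, List.set_getElem_self]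
        have hstop : ¬ (s1 + 1 < e1 - 1) := by omega
        rw [show s1.toNat = sn from rfl, show e1.toNat = en from rfl, hl', twoPtr,
          dif_neg hstop]
        -- at most one non-space char remains in l[s:t]
        refine (assemble_small l hst hlen ?_).symm
        have hsplit : seg l s t = seg l s sn ++ seg l sn (sn + 1) ++ seg l (sn + 1) t := by
          rw [seg_append l (show s ≤ sn by omega) (show sn ≤ t by omega),
            seg_append l (show sn ≤ sn + 1 by omega) (show sn + 1 ≤ t by omega),
            List.append_assoc, ← List.append_assoc]
        have hA : (seg l s sn).filter (fun c => !PySem.Chars.isspace c) = [] := by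
          rw [List.filter_eq_nil_iff]
          intro c hc
          simp [seg_all_space l (fun q h1 h2 _ => hspecS.1 q (by omega) (by omega)) c hc]
        have hC : (seg l (sn + 1) t).filter (fun c => !PySem.Chars.isspace c) = [] := by
          rw [List.filter_eq_nil_iff]
          intro c hc
          simp [seg_all_space l (fun q h1 h2 _ => hspecE.1 q (by omega) (by omega)) c hc]
        rw [hsplit]
        simp only [List.filter_append, hA, hC, List.append_nil, List.nil_append]
        calc ((seg l sn (sn + 1)).filter (fun c => !PySem.Chars.isspace c)).length
            ≤ (seg l sn (sn + 1)).length := List.length_filter_le _ _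
          _ ≤ 1 := by rw [seg_singleton l hsnlen]; simp
      · -- genuine swap
        have hlt1 : sn < en := by omega
        have hxs : PySem.Chars.isspace l[sn] = false := by
          rcases hspecS.2 with h1 | h1
          · omega
          · rwa [hx] at h1
        have hys : PySem.Chars.isspace l[en] = false := by
          rcases hspecE.2 with h1 | h1
          · omega
          · rwa [hy] at h1
        set l' : List Char := (l.set sn l[en]).set en l[sn] with hl'
        have hlen' : l'.length = l.length := by simp [hl']
        have hcall : twoPtr l' (s1 + 1) (e1 - 1) =
            twoPtr l' ((sn + 1 : Nat) : Int) ((en : Int) - 1) := by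
          congr 1 <;> omega
        rw [hcall, ih l' (sn + 1) en (by omega) (by omega) (by omega)]
        -- identify the pieces
        set b : List Char := seg l (sn + 1) en with hb
        have hb' : seg l' (sn + 1) en = b := by
          rw [hl', seg_set_outside _ _ (Or.inr (le_refl en)),
            seg_set_outside _ _ (Or.inl (by omega))]
        have htake : l'.take (sn + 1) = l.take sn ++ [l[en]] := by
          rw [hl', List.take_set_of_le (by omega), take_set_succ l _ hsnlen]
        have hdrop : l'.drop en = l[sn] :: l.drop (en + 1) := by
          rw [hl', drop_set_cons _ _ (by simpa using henlen),
            List.drop_set_of_lt (by omega)]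
        rw [hb', htake, hdrop]
        -- now rewrite the right-hand side into the same shape
        have hsplit : seg l s t =
            seg l s sn ++ ([l[sn]] ++ (b ++ ([l[en]] ++ seg l (en + 1) t))) := by
          rw [seg_append l (show s ≤ sn by omega) (show sn ≤ t by omega),
            seg_append l (show sn ≤ sn + 1 by omega) (show sn + 1 ≤ t by omega),
            seg_append l (show sn + 1 ≤ en by omega) (show en ≤ t by omega),
            seg_append l (show en ≤ en + 1 by omega) (show en + 1 ≤ t by omega),
            seg_singleton l hsnlen, seg_singleton l henlen, hb]
        have hAsp : ∀ c ∈ seg l s sn, PySem.Chars.isspace c = true :=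
          seg_all_space l (fun q h1 h2 _ => hspecS.1 q (by omega) (by omega))
        have hCsp : ∀ c ∈ seg l (en + 1) t, PySem.Chars.isspace c = true :=
          seg_all_space l (fun q h1 h2 _ => hspecE.1 q (by omega) (by omega))
        have hAf : (seg l s sn).filter (fun c => !PySem.Chars.isspace c) = [] := by
          rw [List.filter_eq_nil_iff]; intro c hc; simp [hAsp c hc]
        have hCf : (seg l (en + 1) t).filter (fun c => !PySem.Chars.isspace c) = [] := by
          rw [List.filter_eq_nil_iff]; intro c hc; simp [hCsp c hc]
        have hfilter : (seg l s t).filter (fun c => !PySem.Chars.isspace c) =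
            l[sn] :: ((b.filter (fun c => !PySem.Chars.isspace c)) ++ [l[en]]) := by
          rw [hsplit]
          simp [List.filter_append, hAf, hCf, hxs, hys]
        rw [hfilter, hsplit]
        rw [altScatter_space_prefix _ _ hAsp]
        have hrev : (l[sn] :: ((b.filter (fun c => !PySem.Chars.isspace c)) ++ [l[en]])).reverse =
            l[en] :: ((b.filter (fun c => !PySem.Chars.isspace c)).reverse ++ [l[sn]]) := by
          simp
        rw [hrev]
        rw [show ([l[sn]] ++ (b ++ ([l[en]] ++ seg l (en + 1) t))) =
              l[sn] :: (b ++ ([l[en]] ++ seg l (en + 1) t)) from rfl]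
        rw [show altScatter (l[sn] :: (b ++ ([l[en]] ++ seg l (en + 1) t)))
              (l[en] :: ((b.filter (fun c => !PySem.Chars.isspace c)).reverse ++ [l[sn]])) =
            l[en] :: altScatter (b ++ ([l[en]] ++ seg l (en + 1) t))
              ((b.filter (fun c => !PySem.Chars.isspace c)).reverse ++ [l[sn]]) by
          simp [altScatter, hxs]]
        rw [altScatter_split _ _ (by simp)]
        rw [show altScatter ([l[en]] ++ seg l (en + 1) t) [l[sn]] =
            l[sn] :: altScatter (seg l (en + 1) t) [] by
          simp [altScatter, hys]]
        rw [altScatter_all_space _ hCsp]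
        -- assemble both sides
        rw [show l.take s ++ (seg l s sn ++
              (l[en] :: (altScatter b ((b.filter (fun c => !PySem.Chars.isspace c)).reverse) ++
                l[sn] :: seg l (en + 1) t))) ++ l.drop t =
            (l.take s ++ seg l s sn) ++
              (l[en] :: (altScatter b ((b.filter (fun c => !PySem.Chars.isspace c)).reverse) ++
                l[sn] :: (seg l (en + 1) t ++ l.drop t))) by simp]
        rw [take_append_seg l (show s ≤ sn by omega), seg_append_drop l (show en + 1 ≤ t by omega)]
        simp
    · -- t - s ≤ 1: the loop never runs
      rw [twoPtr, dif_neg hlt]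
      refine (assemble_small l hst hlen ?_).symm
      calc ((seg l s t).filter (fun c => !PySem.Chars.isspace c)).length
          ≤ (seg l s t).length := List.length_filter_le _ _
        _ ≤ 1 := by simp [seg]; omega

-- ===== VERDICT (by name: the statement is the Claim_ definition above) =====
theorem reverse_string_spec : Claim_equal_reverse_string := by
  intro s _
  unfold Spec_reverse_string reverse_string reverse_string_alt
  have h := twoPtr_eq s.toList.length s.toList 0 s.toList.length (by omega) (by omega) (by omega)
  have hseg : seg s.toList 0 s.toList.length = s.toList := by simp [seg]
  rw [hseg] at h
  simp only [Nat.cast_zero, List.take_zero, List.drop_length, List.nil_append,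
    List.append_nil] at h
  simp only [h]
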